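-- pv_equiv track=rewrite | github.com/gilmore307/trading-data | src/data/nport/update_etf_holdings_from_nport.py | flatten_tiers
-- ===== SOURCE A (Python) =====
-- from typing import Any
--
-- def flatten_tiers(payload: dict[str, Any], tiers: list[str] | None) -> list[str]:
--     all_tiers = payload['tiers']
--     selected_names = tiers or list(all_tiers.keys())
--     out = []
--     seen = set()
--     for tier_name in selected_names:
--         for symbol in all_tiers.get(tier_name, []):
--             if symbol not in seen:
--                 seen.add(symbol)
--                 out.append(symbol)
--     return out
-- ===== SOURCE B (Python) =====
-- def flatten_tiers(payload, tiers):
--     all_tiers = payload['tiers']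
--     selected_names = tiers or list(all_tiers.keys())
--     flat = []
--     for name in selected_names:
--         flat.extend(all_tiers.get(name, []))
--     # keep a symbol iff it does not occur earlier in flat: first occurrences, in order,
--     # with no auxiliary seen-structure at all (prefix scan instead)
--     return [s for i, s in enumerate(flat) if s not in flat[:i]]
-- ===== Notes on version B (the rewrite author's own statement) =====
-- stated objective: alternative
-- what changed: Replaces A's single-pass dedup with a seen-set by a two-phase scheme: flatten all selected tiers into one list, then keep each element iff it does not occur earlier in that very list (prefix-membership test s not in flat[:i]), so no auxiliary seen structure exists at all.
import Mathlib
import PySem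

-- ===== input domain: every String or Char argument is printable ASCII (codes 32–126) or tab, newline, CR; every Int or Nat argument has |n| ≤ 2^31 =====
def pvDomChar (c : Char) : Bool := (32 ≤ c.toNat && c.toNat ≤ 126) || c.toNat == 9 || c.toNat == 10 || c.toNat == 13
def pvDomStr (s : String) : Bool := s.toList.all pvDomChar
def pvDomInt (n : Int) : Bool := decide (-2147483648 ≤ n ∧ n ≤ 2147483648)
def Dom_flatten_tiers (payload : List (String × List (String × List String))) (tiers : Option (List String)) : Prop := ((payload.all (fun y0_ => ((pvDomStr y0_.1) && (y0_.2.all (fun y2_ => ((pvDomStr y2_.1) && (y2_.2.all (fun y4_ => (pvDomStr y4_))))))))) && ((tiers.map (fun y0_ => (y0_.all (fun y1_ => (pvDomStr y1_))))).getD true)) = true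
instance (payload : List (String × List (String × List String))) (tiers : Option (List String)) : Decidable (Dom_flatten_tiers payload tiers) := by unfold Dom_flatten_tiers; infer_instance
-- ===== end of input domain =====

-- B replaces A's single-pass seen-set dedup by a two-phase scheme: flatten all selected tiers,
-- then keep each element iff it does not occur earlier in that very list (prefix scan, no seen
-- structure); objective: alternative. Return values only; neither version mutates its arguments.

-- ===== PORT A =====
-- step of A's inner loop: append symbol unless already seen
def pvStepA (acc : List String × PySem.Set String) (sym : String) : List String × PySem.Set String :=
  if PySem.Set.contains acc.2 sym then acc else (acc.1 ++ [sym], PySem.Set.add acc.2 sym)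

def flatten_tiers (payload : List (String × List (String × List String))) (tiers : Option (List String)) : List String :=
  match (PySem.Dict.ofList payload).get? "tiers" with
  | none => []  -- KeyError in Python; excluded by Pre_
  | some at_ =>
    let allTiers := PySem.Dict.ofList at_
    let selected : List String :=
      match tiers with
      | some (t :: ts) => t :: ts         -- 'tiers or …': a non-empty list is truthy
      | _ => allTiers.keys                -- None or [] falls back to all tier names
    (selected.foldl
      (fun acc name => (allTiers.getD name []).foldl pvStepA acc)
      ([], PySem.Set.empty)).1

-- ===== PORT B =====
def flatten_tiers_alt (payload : List (String × List (String × List String))) (tiers : Option (List String)) : List String :=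
  ((PySem.Dict.ofList payload).get? "tiers").elim []  -- KeyError in Python; excluded by Pre_
    (fun at_ =>
      let allTiers := PySem.Dict.ofList at_
      -- 'tiers or list(all_tiers.keys())': an empty or absent tiers list falls back to all names
      let tl := tiers.getD []
      let selected : List String := if tl.isEmpty then allTiers.keys else tl
      -- flat = []; for name in selected: flat.extend(all_tiers.get(name, []))
      let flat : List String := selected.foldl (fun acc name => acc ++ allTiers.getD name []) []
      -- [s for i, s in enumerate(flat) if s not in flat[:i]]
      (PySem.List.enumerate flat 0).filterMap
        (fun p => if p.2 ∈ PySem.List.slice flat none (some p.1) then none else some p.2))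

-- ===== PRECONDITION & SPEC =====
-- Pre_ excludes exactly the payloads without a "tiers" key, on which Python A raises KeyError.
def Pre_flatten_tiers (payload : List (String × List (String × List String))) (tiers : Option (List String)) : Prop :=
  "tiers" ∈ payload.map Prod.fst
instance (payload : List (String × List (String × List String))) (tiers : Option (List String)) : Decidable (Pre_flatten_tiers payload tiers) := by unfold Pre_flatten_tiers; infer_instance

def pvWitness_flatten_tiers : (List (String × List (String × List String))) × Option (List String) :=
  ([("tiers", [("a", ["X", "Y"]), ("b", ["Y", "Z"])])], none)

def Spec_flatten_tiers (payload : List (String × List (String × List String))) (tiers : Option (List String)) (out : List String) : Prop := out = flatten_tiers_alt payload tiers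
instance (payload : List (String × List (String × List String))) (tiers : Option (List String)) (out : List String) : Decidable (Spec_flatten_tiers payload tiers out) := by unfold Spec_flatten_tiers; infer_instance

-- ===== CLAIM =====
def Claim_equal_flatten_tiers : Prop := ∀ (payload : List (String × List (String × List String))) (tiers : Option (List String)), Dom_flatten_tiers payload tiers → Pre_flatten_tiers payload tiers → Spec_flatten_tiers payload tiers (flatten_tiers payload tiers)

-- ===== LEMMAS AND PROOFS =====

-- A's seen-set always equals its out-list, so one step is Set.add on both components.
theorem pvStepA_diag (s : PySem.Set String) (x : String) :
    pvStepA (s, s) x = (PySem.Set.add s x, PySem.Set.add s x) := by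
  unfold pvStepA PySem.Set.add
  by_cases h : x ∈ s <;> simp [h]

theorem foldl_stepA (xs : List String) (s : PySem.Set String) :
    xs.foldl pvStepA (s, s) = (PySem.Set.update s xs, PySem.Set.update s xs) := by
  induction xs generalizing s with
  | nil => simp [PySem.Set.update]
  | cons x xs ih => simp only [List.foldl_cons, pvStepA_diag, ih, PySem.Set.update_cons]

theorem foldl_nested_stepA (l : List String) (g : String → List String) (s : PySem.Set String) :
    l.foldl (fun acc name => (g name).foldl pvStepA acc) (s, s)
      = (PySem.Set.update s (l.flatMap g), PySem.Set.update s (l.flatMap g)) := by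
  induction l generalizing s with
  | nil => simp [PySem.Set.update]
  | cons n l ih =>
    simp only [List.foldl_cons, foldl_stepA, ih, List.flatMap_cons, PySem.Set.update_append]

-- B's loop 'flat.extend(…)' is the flatMap of its bodies.
theorem foldl_extend_gen (l : List String) (g : String → List String) (acc : List String) :
    l.foldl (fun acc name => acc ++ g name) acc = acc ++ l.flatMap g := by
  induction l generalizing acc with
  | nil => simp
  | cons n l ih => simp [ih, List.flatMap_cons]

theorem foldl_extend (l : List String) (g : String → List String) :
    l.foldl (fun acc name => acc ++ g name) [] = l.flatMap g := by
  simpa using foldl_extend_gen l g []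

-- the prefix-membership filter keeps exactly the first occurrences:
-- updating the set of an already-scanned prefix 'pre' with the rest 'xs' appends precisely
-- the elements of xs that do not occur earlier in pre ++ xs.
theorem pvKeepFirst (xs pre : List String) :
    PySem.Set.update (PySem.Set.ofList pre) xs
      = PySem.Set.ofList pre ++
        (PySem.List.enumerate xs (pre.length : Int)).filterMap
          (fun p => if p.2 ∈ PySem.List.slice (pre ++ xs) none (some p.1) then none else some p.2) := by
  induction xs generalizing pre with
  | nil => simp [PySem.Set.update, PySem.List.enumerate]
  | cons x xs ih =>
    have hsl : PySem.List.slice (pre ++ x :: xs) none (some (pre.length : Int)) = pre := by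
      rw [PySem.List.slice_to_natCast]
      exact List.take_left
    have hofl : PySem.Set.ofList (pre ++ [x]) = PySem.Set.add (PySem.Set.ofList pre) x := by
      simp [PySem.Set.ofList_eq_foldl, List.foldl_append]
    have happ : pre ++ x :: xs = (pre ++ [x]) ++ xs := by simp
    have hlen : ((pre ++ [x]).length : Int) = (pre.length : Int) + 1 := by
      simp
    have ihx := ih (pre ++ [x])
    rw [happ, PySem.Set.update_cons, ← hofl, ihx, hlen, hofl,
        PySem.List.enumerate_cons, List.filterMap_cons]
    by_cases h : x ∈ pre
    · have hc : PySem.Set.add (PySem.Set.ofList pre) x = PySem.Set.ofList pre := by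
        unfold PySem.Set.add
        simp [PySem.Set.contains, PySem.Set.mem_ofList, h]
      rw [← happ] at *
      simp [hsl, h]
    · have hc : PySem.Set.add (PySem.Set.ofList pre) x = PySem.Set.ofList pre ++ [x] := by
        unfold PySem.Set.add
        simp [PySem.Set.contains, PySem.Set.mem_ofList, h]
      rw [← happ] at *
      simp [hsl, h]

-- specialisation of pvKeepFirst to an empty scanned prefix
theorem pvKeepFirst_nil (F : List String) :
    PySem.Set.update (PySem.Set.ofList []) F
      = (PySem.List.enumerate F 0).filterMap
          (fun p => if p.2 ∈ PySem.List.slice F none (some p.1) then none else some p.2) := by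
  simpa using pvKeepFirst F []

-- ===== VERDICT =====
theorem flatten_tiers_spec : Claim_equal_flatten_tiers := by
  intro payload tiers _ _
  unfold Spec_flatten_tiers flatten_tiers flatten_tiers_alt
  cases h : (PySem.Dict.ofList payload).get? "tiers" with
  | none => rfl
  | some at_ =>
    simp only [Option.elim]
    rw [show (([], PySem.Set.empty) : List String × PySem.Set String)
          = (PySem.Set.ofList [], PySem.Set.ofList []) from rfl]
    rcases tiers with _ | ⟨_ | ⟨t, ts⟩⟩ <;>
      · rw [foldl_nested_stepA, foldl_extend]
        exact pvKeepFirst_nil _
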